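-- pv_equiv track=rewrite | github.com/iproha94/contests | codeforces/1154/c.py | _sub_f
-- ===== SOURCE A (Python) =====
-- plan = [0, 1, 2, 0, 2, 1, 0, 0, 1, 2, 0, 2, 1, 0]
--
-- def _sub_f(start, now, a, b, c, sum):
--     if now == 7:
--         return sum
--     elif plan[start + now] == 0 and a == 0:
--         return sum
--     elif plan[start + now] == 1 and b == 0:
--         return sum
--     elif plan[start + now] == 2 and c == 0:
--         return sum
--     elif plan[start + now] == 0:
--         return _sub_f(start, now + 1, a - 1, b, c, sum + 1)
--     elif plan[start + now] == 1:
--         return _sub_f(start, now + 1, a, b - 1, c, sum + 1)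
--     elif plan[start + now] == 2:
--         return _sub_f(start, now + 1, a, b, c - 1, sum + 1)
-- ===== SOURCE B (Python) =====
-- plan = [0, 1, 2, 0, 2, 1, 0, 0, 1, 2, 0, 2, 1, 0]
--
-- def _sub_f(start, now, a, b, c, sum):
--     cnt = [a, b, c]
--     acc = sum
--     i = now
--     while i != 7:
--         t = plan[start + i]
--         if cnt[t] == 0:
--             return acc
--         cnt[t] -= 1
--         acc += 1
--         i += 1
--     return acc
-- ===== Notes on version B (the rewrite author's own statement) =====
-- stated objective: simpler
-- what changed: Replaces A's six-way branching recursion by a plain iterative while-loop over days with the three counters kept in an indexable list, so one uniform zero-check/decrement replaces the per-food-type branches.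
import Mathlib
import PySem

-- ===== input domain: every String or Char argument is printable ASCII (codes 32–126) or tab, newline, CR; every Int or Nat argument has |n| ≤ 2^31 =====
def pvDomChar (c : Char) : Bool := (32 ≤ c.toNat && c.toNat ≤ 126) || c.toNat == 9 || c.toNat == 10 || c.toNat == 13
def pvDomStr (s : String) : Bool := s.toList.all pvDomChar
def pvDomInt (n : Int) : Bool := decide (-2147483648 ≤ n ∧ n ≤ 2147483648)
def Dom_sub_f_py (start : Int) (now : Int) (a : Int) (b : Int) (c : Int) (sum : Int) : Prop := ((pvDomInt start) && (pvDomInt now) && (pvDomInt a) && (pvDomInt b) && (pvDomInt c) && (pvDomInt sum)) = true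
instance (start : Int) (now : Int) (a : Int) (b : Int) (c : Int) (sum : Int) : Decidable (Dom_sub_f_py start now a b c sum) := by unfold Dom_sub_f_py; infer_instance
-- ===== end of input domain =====

-- B replaces A's six-way branching recursion by a plain iterative loop with the three counters
-- kept in one indexable structure: a simpler decomposition, same cost.

-- ===== PORT A =====
def planL : List Int := [0, 1, 2, 0, 2, 1, 0, 0, 1, 2, 0, 2, 1, 0]

def sub_f_py (start : Int) (now : Int) (a : Int) (b : Int) (c : Int) (sum : Int) : Int :=
  if now = 7 then sum
  else
    match h : PySem.List.pyGet? planL (start + now) with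
    | none => 0  -- Python raises IndexError here; excluded by Pre_
    | some t =>
      if t = 0 ∧ a = 0 then sum
      else if t = 1 ∧ b = 0 then sum
      else if t = 2 ∧ c = 0 then sum
      else if t = 0 then sub_f_py start (now + 1) (a - 1) b c (sum + 1)
      else if t = 1 then sub_f_py start (now + 1) a (b - 1) c (sum + 1)
      else if t = 2 then sub_f_py start (now + 1) a b (c - 1) (sum + 1)
      else 0  -- unreachable (plan holds only 0/1/2); Python would return None
termination_by (14 - (start + now)).toNat
decreasing_by
  all_goals
    have hin : PySem.Raise.InRange planL.length (start + now) := by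
      by_contra hc
      rw [← PySem.List.pyGet?_eq_none_iff (xs := planL)] at hc
      simp [hc] at h
    have hlt : start + now < 14 := by
      have := hin
      simp [PySem.Raise.InRange, planL] at this
      omega
    omega

-- ===== PORT B =====
-- the while-loop of Source B ('while i != 7'): state (cnt[0], cnt[1], cnt[2], acc), index i
def subFLoop (start : Int) (ca : Int) (cb : Int) (cc : Int) (acc : Int) (i : Int) : Int :=
  if i = 7 then acc
  else
    match h : PySem.List.pyGet? planL (start + i) with
    | none => 0  -- Python raises IndexError here; excluded by Pre_
    | some t =>
      if (if t = 0 then ca else if t = 1 then cb else cc) = 0 then acc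
      else subFLoop start (if t = 0 then ca - 1 else ca) (if t = 1 then cb - 1 else cb)
             (if t = 2 then cc - 1 else cc) (acc + 1) (i + 1)
termination_by (14 - (start + i)).toNat
decreasing_by
  all_goals
    have hin : PySem.Raise.InRange planL.length (start + i) := by
      by_contra hc
      rw [← PySem.List.pyGet?_eq_none_iff (xs := planL)] at hc
      simp [hc] at h
    have hlt : start + i < 14 := by
      have := hin
      simp [PySem.Raise.InRange, planL] at this
      omega
    omega

def sub_f_py_alt (start : Int) (now : Int) (a : Int) (b : Int) (c : Int) (sum : Int) : Int :=
  subFLoop start a b c sum now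

-- ===== PRECONDITION & SPEC =====
-- plan value at index i (3 = out of range), initial counter of a food type, and the number of
-- days of a given food type served on days now..j-1: used only to STATE where A stops.
def planVal (i : Int) : Int := (PySem.List.pyGet? planL i).getD 3
def initCnt (a : Int) (b : Int) (c : Int) (t : Int) : Int :=
  if t = 0 then a else if t = 1 then b else c
def occCnt (start : Int) (now : Int) (j : Int) (t : Int) : Int :=
  ((List.range (j - now).toNat).filter (fun k => planVal (start + now + (k : Int)) = t)).length

-- Pre_ holds exactly on the inputs on which Python A RETURNS; it excludes exactly the inputs on
-- which A raises IndexError (the day walk runs past plan's index range before day 7 is reached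
-- or a zero counter stops it) — B raises there too.  A returns iff: now is already 7, or the
-- whole window of days now..6 lies in range, or some day j still in range is a stopping day
-- (its food type's initial counter equals the number of earlier servings of that type).
def Pre_sub_f_py (start : Int) (now : Int) (a : Int) (b : Int) (c : Int) (sum : Int) : Prop :=
  now = 7 ∨ (now ≤ 6 ∧ -14 ≤ start + now ∧ start + 6 ≤ 13) ∨
    (now ≠ 7 ∧ -14 ≤ start + now ∧
      ∃ j ∈ PySem.List.pyRange (max now (-14 - start)) (14 - start) 1,
        initCnt a b c (planVal (start + j)) = occCnt start now j (planVal (start + j)))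
instance (start : Int) (now : Int) (a : Int) (b : Int) (c : Int) (sum : Int) : Decidable (Pre_sub_f_py start now a b c sum) := by unfold Pre_sub_f_py; infer_instance
def pvWitness_sub_f_py : Int × Int × Int × Int × Int × Int := (0, 0, 3, 2, 2, 0)

def Spec_sub_f_py (start : Int) (now : Int) (a : Int) (b : Int) (c : Int) (sum : Int) (out : Int) : Prop := out = sub_f_py_alt start now a b c sum
instance (start : Int) (now : Int) (a : Int) (b : Int) (c : Int) (sum : Int) (out : Int) : Decidable (Spec_sub_f_py start now a b c sum out) := by unfold Spec_sub_f_py; infer_instance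

-- ===== CLAIM (what is proved, stated in full; the proofs are below) =====
def Claim_equal_sub_f_py : Prop := ∀ (start : Int) (now : Int) (a : Int) (b : Int) (c : Int) (sum : Int), Dom_sub_f_py start now a b c sum → Pre_sub_f_py start now a b c sum → Spec_sub_f_py start now a b c sum (sub_f_py start now a b c sum)

-- ===== LEMMAS AND PROOFS =====

-- every in-range lookup in plan yields 0, 1 or 2
theorem planL_get (i : Int) (h1 : -14 ≤ i) (h2 : i ≤ 13) :
    PySem.List.pyGet? planL i = some 0 ∨ PySem.List.pyGet? planL i = some 1 ∨
    PySem.List.pyGet? planL i = some 2 := by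
  interval_cases i <;> decide

-- the two ports agree on EVERY input (where Python raises, both ports return the same sentinel)
theorem ports_agree (n : Nat) : ∀ (start now a b c sum : Int),
    (14 - (start + now)).toNat ≤ n →
    sub_f_py start now a b c sum = subFLoop start a b c sum now := by
  induction n with
  | zero =>
    intro start now a b c sum hn
    by_cases h : now = 7
    · subst h; rw [sub_f_py, subFLoop]; simp
    · have hnone : PySem.List.pyGet? planL (start + now) = none := by
        rw [PySem.List.pyGet?_eq_none_iff]
        simp [PySem.Raise.InRange, planL]
        omega
      rw [sub_f_py, subFLoop, if_neg h, if_neg h, hnone]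
  | succ n ih =>
    intro start now a b c sum hn
    by_cases h : now = 7
    · subst h; rw [sub_f_py, subFLoop]; simp
    · rw [sub_f_py, subFLoop, if_neg h, if_neg h]
      split
      · rfl
      · rename_i t heq
        have hin : PySem.Raise.InRange planL.length (start + now) := by
          by_contra hc
          rw [← PySem.List.pyGet?_eq_none_iff (xs := planL)] at hc
          simp [hc] at heq
        have hb : -14 ≤ start + now ∧ start + now ≤ 13 := by
          have := hin
          simp [PySem.Raise.InRange, planL] at this
          omega
        have hrec : ∀ a b c sum, sub_f_py start (now + 1) a b c sum = subFLoop start a b c sum (now + 1) := by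
          intro a b c sum
          exact ih start (now + 1) a b c sum (by omega)
        rcases planL_get (start + now) hb.1 hb.2 with ht | ht | ht <;>
          · rw [ht] at heq
            injection heq with heq'
            subst heq'
            by_cases ha : a = 0 <;> by_cases hbz : b = 0 <;> by_cases hcz : c = 0 <;>
              simp [ha, hbz, hcz, hrec]

-- ===== VERDICT (by name: the statement is the Claim_ definition above) =====
theorem sub_f_py_spec : Claim_equal_sub_f_py := by
  intro start now a b c sum _ _
  unfold Spec_sub_f_py sub_f_py_alt
  exact ports_agree (14 - (start + now)).toNat start now a b c sum le_rfl
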